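-- pv_equiv track=rewrite | github.com/Jiliar/misiontic-ciclo1-python | retos/emuler.py | clasify_alarms
-- ===== SOURCE A (Python) =====
-- ALERTAS = [ ((-1,50),     'verde'),
--             ((50,100),    'amarillo'),
--             ((100,150),   'naranja'),
--             ((150,200),   'rojo'),
--             ((200,300),   'morado'),
--             ((300,99999999999),'marron')]
--
-- def clasify_alarms(alerts):
--     answer = {}
--     acum = '';
--     for alert in ALERTAS:
--         answer.update({alert[1]: 0})
--
--     for aux in answer.keys():
--         answer[aux] = alerts.count(aux)
--
--     for i in answer.values():
--         acum += str(i)+' '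
--
--     return acum.strip()
-- ===== SOURCE B (Python) =====
-- COLORS = ['verde', 'amarillo', 'naranja', 'rojo', 'morado', 'marron']
--
-- def _bisect_left(s, x, lo, hi):
--     while lo < hi:
--         mid = (lo + hi) // 2
--         if s[mid] < x:
--             lo = mid + 1
--         else:
--             hi = mid
--     return lo
--
-- def _bisect_right(s, x, lo, hi):
--     while lo < hi:
--         mid = (lo + hi) // 2
--         if x < s[mid]:
--             hi = mid
--         else:
--             lo = mid + 1
--     return lo
--
-- def clasify_alarms(alerts):
--     s = sorted(alerts)
--     n = len(s)
--     return ' '.join(str(_bisect_right(s, c, 0, n) - _bisect_left(s, c, 0, n))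
--                     for c in COLORS)
-- ===== Notes on version B (the rewrite author's own statement) =====
-- stated objective: alternative
-- what changed: Instead of A's six separate linear list.count scans over a pre-seeded dict, B sorts the list once and obtains each color's count as bisect_right minus bisect_left (hand-written binary searches) on the sorted copy, joining the six counts in the fixed color order.
import Mathlib
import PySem

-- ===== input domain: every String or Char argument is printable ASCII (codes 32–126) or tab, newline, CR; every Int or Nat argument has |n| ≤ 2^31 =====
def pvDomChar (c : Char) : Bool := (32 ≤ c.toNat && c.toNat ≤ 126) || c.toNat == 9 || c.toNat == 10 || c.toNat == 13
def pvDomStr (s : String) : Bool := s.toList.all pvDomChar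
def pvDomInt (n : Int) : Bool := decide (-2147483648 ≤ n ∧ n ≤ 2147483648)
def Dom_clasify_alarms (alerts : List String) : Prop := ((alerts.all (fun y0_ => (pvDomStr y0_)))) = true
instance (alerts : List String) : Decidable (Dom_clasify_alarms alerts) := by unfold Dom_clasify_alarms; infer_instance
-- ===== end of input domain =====

-- B sorts the list once and finds each color's count as the width of its range via two hand-written binary searches, instead of A's six linear .count scans over a pre-seeded dict (alternative algorithm; same return value).


-- ===== PORT A =====
def ALERTAS : List ((Int × Int) × String) :=
  [ ((-1, 50), "verde"),
    ((50, 100), "amarillo"),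
    ((100, 150), "naranja"),
    ((150, 200), "rojo"),
    ((200, 300), "morado"),
    ((300, 99999999999), "marron") ]

def clasify_alarms (alerts : List String) : String :=
  -- answer = {}; for alert in ALERTAS: answer.update({alert[1]: 0})
  let answer : PySem.Dict String Int :=
    ALERTAS.foldl (fun d alert => d.insert alert.2 0) PySem.Dict.empty
  -- for aux in answer.keys(): answer[aux] = alerts.count(aux)
  let answer :=
    answer.keys.foldl (fun d aux => d.insert aux (PySem.List.count alerts aux : Int)) answer
  -- acum = ''; for i in answer.values(): acum += str(i)+' '
  let acum : String :=
    answer.values.foldl (fun acc i => acc ++ PySem.Int.toStr i ++ " ") ""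
  PySem.Str.strip acum

-- ===== PORT B =====
def COLORS : List String := ["verde", "amarillo", "naranja", "rojo", "morado", "marron"]

-- cited by the binary searches' decreasing_by: the midpoint lies in [lo, hi)
lemma pvMid_bounds {lo hi : Int} (h : lo < hi) :
    lo ≤ PySem.Int.floordiv (lo + hi) 2 ∧ PySem.Int.floordiv (lo + hi) 2 < hi := by
  simp only [PySem.Int.floordiv, Int.fdiv_eq_ediv]
  omega

-- _bisect_left's while-loop; s[mid] read via pyGet? (always in range when called with 0 ≤ lo ≤ hi ≤ len)
def pvBisectLeft (s : List String) (x : String) (lo hi : Int) : Int :=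
  if h : lo < hi then
    let mid := PySem.Int.floordiv (lo + hi) 2
    if (PySem.List.pyGet? s mid).getD "" < x then pvBisectLeft s x (mid + 1) hi
    else pvBisectLeft s x lo mid
  else lo
termination_by (hi - lo).toNat
decreasing_by
  · have := pvMid_bounds h; omega
  · have := pvMid_bounds h; omega

-- _bisect_right's while-loop
def pvBisectRight (s : List String) (x : String) (lo hi : Int) : Int :=
  if h : lo < hi then
    let mid := PySem.Int.floordiv (lo + hi) 2
    if x < (PySem.List.pyGet? s mid).getD "" then pvBisectRight s x lo mid
    else pvBisectRight s x (mid + 1) hi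
  else lo
termination_by (hi - lo).toNat
decreasing_by
  · have := pvMid_bounds h; omega
  · have := pvMid_bounds h; omega

def clasify_alarms_alt (alerts : List String) : String :=
  -- s = sorted(alerts); n = len(s)
  let s := PySem.List.sorted alerts (fun x => x) false
  let n : Int := s.length
  -- ' '.join(str(_bisect_right(s,c,0,n) - _bisect_left(s,c,0,n)) for c in COLORS)
  PySem.Str.join " "
    (COLORS.map (fun c => PySem.Int.toStr (pvBisectRight s c 0 n - pvBisectLeft s c 0 n)))

-- ===== PRECONDITION & SPEC =====
def Spec_clasify_alarms (alerts : List String) (out : String) : Prop := out = clasify_alarms_alt alerts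
instance (alerts : List String) (out : String) : Decidable (Spec_clasify_alarms alerts out) := by unfold Spec_clasify_alarms; infer_instance

-- ===== CLAIM (what is proved, stated in full; the proofs are below) =====
def Claim_equal_clasify_alarms : Prop := ∀ (alerts : List String), Dom_clasify_alarms alerts → Spec_clasify_alarms alerts (clasify_alarms alerts)

-- ===== LEMMAS AND PROOFS =====

-- On a sorted list, a downward-closed predicate holds exactly on the first countP positions.
lemma pvCountP_iff (p : String → Bool) (hp : ∀ a b : String, a ≤ b → p b = true → p a = true)
    (s : List String) (hs : s.Pairwise (· ≤ ·)) (j : Nat) (hj : j < s.length) :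
    p s[j] = true ↔ j < s.countP p := by
  induction s generalizing j with
  | nil => simp at hj
  | cons a t ih =>
    obtain ⟨ha, ht⟩ := List.pairwise_cons.mp hs
    by_cases hpa : p a = true
    · cases j with
      | zero => simp [List.countP_cons, hpa]
      | succ j =>
        have h' := ih ht j (by simpa using hj)
        rw [List.getElem_cons_succ, h', List.countP_cons, hpa]
        simp only [if_true]
        omega
    · have ht0 : t.countP p = 0 :=
        List.countP_eq_zero.mpr (fun b hb hq => absurd (hp a b (ha b hb) hq) hpa)
      cases j with
      | zero =>
        simp [List.countP_cons, hpa, ht0]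
      | succ j =>
        have hjt : j < t.length := by simpa using hj
        have : p t[j] = false := by
          cases hq : p t[j] with
          | false => rfl
          | true => exact absurd (hp a t[j] (ha _ (List.getElem_mem hjt)) hq) hpa
        simp [List.countP_cons, hpa, ht0, this]

lemma pvBisectLeft_eq (s : List String) (x : String) (hs : s.Pairwise (· ≤ ·))
    (lo hi : Int) (h0 : 0 ≤ lo) (hh : hi ≤ s.length)
    (hk1 : lo ≤ (s.countP (fun y => decide (y < x)) : Int))
    (hk2 : (s.countP (fun y => decide (y < x)) : Int) ≤ hi) :
    pvBisectLeft s x lo hi = s.countP (fun y => decide (y < x)) := by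
  fun_induction pvBisectLeft s x lo hi with
  | case1 lo hi h mid hlt ih =>
    have hm := pvMid_bounds h
    have hmn : mid.toNat < s.length := by omega
    have h1 : PySem.List.pyGet? s mid = s[mid.toNat]? := by
      obtain ⟨m, hmeq⟩ : ∃ m : Nat, mid = (m : Int) := ⟨mid.toNat, by omega⟩
      rw [hmeq, PySem.List.pyGet?_natCast, Int.toNat_natCast]
    have hget : (PySem.List.pyGet? s mid).getD "" = s[mid.toNat] := by
      rw [h1, List.getElem?_eq_getElem hmn, Option.getD_some]
    have hkey : mid.toNat < s.countP (fun y => decide (y < x)) := by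
      have := (pvCountP_iff (fun y => decide (y < x))
        (fun a b hab hb => decide_eq_true (lt_of_le_of_lt hab (of_decide_eq_true hb)))
        s hs mid.toNat hmn).mp (decide_eq_true (hget ▸ hlt))
      exact this
    exact ih (by omega) hh (by omega) hk2
  | case2 lo hi h mid hlt ih =>
    have hm := pvMid_bounds h
    have hmn : mid.toNat < s.length := by omega
    have h1 : PySem.List.pyGet? s mid = s[mid.toNat]? := by
      obtain ⟨m, hmeq⟩ : ∃ m : Nat, mid = (m : Int) := ⟨mid.toNat, by omega⟩
      rw [hmeq, PySem.List.pyGet?_natCast, Int.toNat_natCast]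
    have hget : (PySem.List.pyGet? s mid).getD "" = s[mid.toNat] := by
      rw [h1, List.getElem?_eq_getElem hmn, Option.getD_some]
    have hkey : s.countP (fun y => decide (y < x)) ≤ mid.toNat := by
      by_contra hcon
      exact hlt (hget ▸ of_decide_eq_true ((pvCountP_iff (fun y => decide (y < x))
        (fun a b hab hb => decide_eq_true (lt_of_le_of_lt hab (of_decide_eq_true hb)))
        s hs mid.toNat hmn).mpr (by omega)))
    exact ih h0 (by omega) hk1 (by omega)
  | case3 lo hi h => omega

lemma pvBisectRight_eq (s : List String) (x : String) (hs : s.Pairwise (· ≤ ·))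
    (lo hi : Int) (h0 : 0 ≤ lo) (hh : hi ≤ s.length)
    (hk1 : lo ≤ (s.countP (fun y => decide (y ≤ x)) : Int))
    (hk2 : (s.countP (fun y => decide (y ≤ x)) : Int) ≤ hi) :
    pvBisectRight s x lo hi = s.countP (fun y => decide (y ≤ x)) := by
  fun_induction pvBisectRight s x lo hi with
  | case1 lo hi h mid hlt ih =>
    have hm := pvMid_bounds h
    have hmn : mid.toNat < s.length := by omega
    have h1 : PySem.List.pyGet? s mid = s[mid.toNat]? := by
      obtain ⟨m, hmeq⟩ : ∃ m : Nat, mid = (m : Int) := ⟨mid.toNat, by omega⟩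
      rw [hmeq, PySem.List.pyGet?_natCast, Int.toNat_natCast]
    have hget : (PySem.List.pyGet? s mid).getD "" = s[mid.toNat] := by
      rw [h1, List.getElem?_eq_getElem hmn, Option.getD_some]
    have hkey : s.countP (fun y => decide (y ≤ x)) ≤ mid.toNat := by
      by_contra hcon
      have hle : s[mid.toNat] ≤ x := of_decide_eq_true ((pvCountP_iff (fun y => decide (y ≤ x))
        (fun a b hab hb => decide_eq_true (le_trans hab (of_decide_eq_true hb)))
        s hs mid.toNat hmn).mpr (by omega))
      exact absurd (hget ▸ hlt) (not_lt_of_ge hle)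
    exact ih h0 (by omega) hk1 (by omega)
  | case2 lo hi h mid hlt ih =>
    have hm := pvMid_bounds h
    have hmn : mid.toNat < s.length := by omega
    have h1 : PySem.List.pyGet? s mid = s[mid.toNat]? := by
      obtain ⟨m, hmeq⟩ : ∃ m : Nat, mid = (m : Int) := ⟨mid.toNat, by omega⟩
      rw [hmeq, PySem.List.pyGet?_natCast, Int.toNat_natCast]
    have hget : (PySem.List.pyGet? s mid).getD "" = s[mid.toNat] := by
      rw [h1, List.getElem?_eq_getElem hmn, Option.getD_some]
    have hle : s[mid.toNat] ≤ x := le_of_not_gt (fun hc => hlt (hget ▸ hc))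
    have hkey : mid.toNat < s.countP (fun y => decide (y ≤ x)) :=
      (pvCountP_iff (fun y => decide (y ≤ x))
        (fun a b hab hb => decide_eq_true (le_trans hab (of_decide_eq_true hb)))
        s hs mid.toNat hmn).mp (decide_eq_true hle)
    exact ih (by omega) hh (by omega) hk2
  | case3 lo hi h => omega

-- countP(≤ x) = countP(< x) + count x  (no sortedness needed)
lemma pvCountP_split (s : List String) (x : String) :
    s.countP (fun y => decide (y ≤ x)) = s.countP (fun y => decide (y < x)) + s.count x := by
  induction s with
  | nil => simp
  | cons a t ih =>
    rcases lt_trichotomy a x with h | h | h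
    · have h1 : decide (a ≤ x) = true := decide_eq_true (le_of_lt h)
      have h2 : decide (a < x) = true := decide_eq_true h
      have h3 : (a == x) = false := beq_eq_false_iff_ne.mpr (ne_of_lt h)
      simp only [List.countP_cons, List.count_cons, h1, h2, h3, if_true, Bool.false_eq_true,
        if_false, ih]
      omega
    · subst h
      have h1 : decide (a ≤ a) = true := decide_eq_true le_rfl
      have h2 : decide (a < a) = false := decide_eq_false (lt_irrefl a)
      have h3 : (a == a) = true := beq_self_eq_true a
      simp only [List.countP_cons, List.count_cons, h1, h2, h3, if_true, Bool.false_eq_true,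
        if_false, ih]
      omega
    · have h1 : decide (a ≤ x) = false := decide_eq_false (not_le_of_gt h)
      have h2 : decide (a < x) = false := decide_eq_false (fun hc => absurd (lt_trans hc h) (lt_irrefl a))
      have h3 : (a == x) = false := beq_eq_false_iff_ne.mpr (ne_of_gt h)
      simp only [List.countP_cons, List.count_cons, h1, h2, h3, Bool.false_eq_true, if_false, ih]
      omega

-- the two binary searches on the sorted copy bracket exactly the occurrences of c in alerts
lemma pvB_count (alerts : List String) (c : String) :
    pvBisectRight (PySem.List.sorted alerts (fun x => x) false) c 0 (alerts.length : Int)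
      - pvBisectLeft (PySem.List.sorted alerts (fun x => x) false) c 0 (alerts.length : Int)
      = (List.count c alerts : Int) := by
  set s := PySem.List.sorted alerts (fun x => x) false with hsdef
  have hlen : alerts.length = s.length := ((PySem.List.sorted_perm alerts (fun x => x) false).length_eq).symm
  have hs : s.Pairwise (· ≤ ·) := PySem.List.sorted_pairwise alerts (fun x => x)
  have hbl := pvBisectLeft_eq s c hs 0 (alerts.length : Int) (le_refl 0) (by exact_mod_cast hlen.le)
    (by positivity) (by rw [hlen]; exact_mod_cast List.countP_le_length)
  have hbr := pvBisectRight_eq s c hs 0 (alerts.length : Int) (le_refl 0) (by exact_mod_cast hlen.le)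
    (by positivity) (by rw [hlen]; exact_mod_cast List.countP_le_length)
  have hperm : List.count c s = List.count c alerts :=
    (PySem.List.sorted_perm alerts (fun x => x) false).count_eq c
  have hsplit := pvCountP_split s c
  have hc : s.count c = List.count c s := rfl
  rw [hbl, hbr]
  omega

lemma pvDigitChar_not_space (m : Nat) (h : m < 10) : PySem.Chars.isspace m.digitChar = false := by
  interval_cases m <;> decide

lemma pvTDC_ne_nil (fuel n : Nat) (ds : List Char) (h : ds ≠ []) :
    Nat.toDigitsCore 10 fuel n ds ≠ [] := by
  induction fuel generalizing n ds with
  | zero => simpa [Nat.toDigitsCore] using h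
  | succ f ih =>
    simp only [Nat.toDigitsCore]
    split
    · simp
    · exact ih _ _ (by simp)

lemma pvTDC_not_space (fuel n : Nat) (ds : List Char)
    (h : ∀ c ∈ ds, PySem.Chars.isspace c = false) :
    ∀ c ∈ Nat.toDigitsCore 10 fuel n ds, PySem.Chars.isspace c = false := by
  induction fuel generalizing n ds with
  | zero => simpa [Nat.toDigitsCore] using h
  | succ f ih =>
    simp only [Nat.toDigitsCore]
    have hd : ∀ c ∈ ((n % 10).digitChar :: ds), PySem.Chars.isspace c = false := by
      intro c hc
      rcases List.mem_cons.mp hc with rfl | hc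
      · exact pvDigitChar_not_space _ (Nat.mod_lt _ (by norm_num))
      · exact h _ hc
    split
    · exact hd
    · exact ih _ _ hd

lemma pvToDigits_ne_nil (n : Nat) : Nat.toDigits 10 n ≠ [] := by
  unfold Nat.toDigits
  simp only [Nat.toDigitsCore]
  split
  · simp
  · exact pvTDC_ne_nil _ _ _ (by simp)

lemma pvToDigits_not_space (n : Nat) :
    ∀ c ∈ Nat.toDigits 10 n, PySem.Chars.isspace c = false := by
  unfold Nat.toDigits
  exact pvTDC_not_space _ _ _ (by simp)

lemma pvToChars_natCast (n : Nat) : PySem.Int.toChars (n : Int) = Nat.toDigits 10 n := by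
  rw [PySem.Int.toChars, if_neg (by omega), Int.toNat_natCast]

lemma pvLstrip_append (l r : List Char) (hl : l ≠ [])
    (h : ∀ c ∈ l, PySem.Chars.isspace c = false) :
    PySem.Chars.lstrip (l ++ r) = l ++ r := by
  cases l with
  | nil => exact absurd rfl hl
  | cons c t =>
    simp [PySem.Chars.lstrip, h c (List.mem_cons_self ..)]

lemma pvRstrip_space (l : List Char) :
    PySem.Chars.rstrip (l ++ [' ']) = PySem.Chars.rstrip l := by
  simp [PySem.Chars.rstrip, (by decide : PySem.Chars.isspace ' ' = true)]

lemma pvRstrip_append (l r : List Char) (hr : r ≠ [])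
    (h : ∀ c ∈ r, PySem.Chars.isspace c = false) :
    PySem.Chars.rstrip (l ++ r) = l ++ r := by
  rcases hrev : r.reverse with _ | ⟨c, t⟩
  · exact absurd (by simpa using congrArg List.reverse hrev) hr
  · have hc : c ∈ r := by
      have : c ∈ r.reverse := by rw [hrev]; exact List.mem_cons_self ..
      simpa using this
    rw [PySem.Chars.rstrip]
    rw [List.reverse_append, hrev, List.cons_append, List.dropWhile_cons, h c hc]
    simp only [Bool.false_eq_true, if_false]
    rw [← List.cons_append, ← hrev, ← List.reverse_append, List.reverse_reverse]

lemma pvStrip_six (t1 t2 t3 t4 t5 t6 : List Char)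
    (h1 : t1 ≠ []) (h6 : t6 ≠ [])
    (w1 : ∀ c ∈ t1, PySem.Chars.isspace c = false)
    (w6 : ∀ c ∈ t6, PySem.Chars.isspace c = false) :
    PySem.Chars.strip (t1 ++ ' ' :: (t2 ++ ' ' :: (t3 ++ ' ' :: (t4 ++ ' ' :: (t5 ++ ' ' :: (t6 ++ [' '])))))) =
      t1 ++ ' ' :: (t2 ++ ' ' :: (t3 ++ ' ' :: (t4 ++ ' ' :: (t5 ++ ' ' :: t6)))) := by
  rw [PySem.Chars.strip,
    pvLstrip_append t1 (' ' :: (t2 ++ ' ' :: (t3 ++ ' ' :: (t4 ++ ' ' :: (t5 ++ ' ' :: (t6 ++ [' '])))))) h1 w1,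
    show t1 ++ ' ' :: (t2 ++ ' ' :: (t3 ++ ' ' :: (t4 ++ ' ' :: (t5 ++ ' ' :: (t6 ++ [' '])))))
       = (t1 ++ ' ' :: (t2 ++ ' ' :: (t3 ++ ' ' :: (t4 ++ ' ' :: (t5 ++ ' ' :: t6))))) ++ [' '] from by simp,
    pvRstrip_space,
    show t1 ++ ' ' :: (t2 ++ ' ' :: (t3 ++ ' ' :: (t4 ++ ' ' :: (t5 ++ ' ' :: t6))))
       = (t1 ++ ' ' :: (t2 ++ ' ' :: (t3 ++ ' ' :: (t4 ++ ' ' :: (t5 ++ [' ']))))) ++ t6 from by simp,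
    pvRstrip_append _ t6 h6 w6]

lemma pvA_toList (alerts : List String) :
    (clasify_alarms alerts).toList = PySem.Chars.strip
      (Nat.toDigits 10 (List.count "verde" alerts) ++ ' ' ::
        (Nat.toDigits 10 (List.count "amarillo" alerts) ++ ' ' ::
          (Nat.toDigits 10 (List.count "naranja" alerts) ++ ' ' ::
            (Nat.toDigits 10 (List.count "rojo" alerts) ++ ' ' ::
              (Nat.toDigits 10 (List.count "morado" alerts) ++ ' ' ::
                (Nat.toDigits 10 (List.count "marron" alerts) ++ [' '])))))) := by
  simp [clasify_alarms, ALERTAS, List.foldl,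
    PySem.Dict.insert, PySem.Dict.contains, PySem.Dict.empty, PySem.Dict.keys,
    PySem.Dict.values,
    PySem.Str.toList_strip, PySem.Int.toList_toStr, pvToChars_natCast,
    PySem.List.count_eq]

lemma pvB_toList (alerts : List String) :
    (clasify_alarms_alt alerts).toList =
      Nat.toDigits 10 (List.count "verde" alerts) ++ ' ' ::
        (Nat.toDigits 10 (List.count "amarillo" alerts) ++ ' ' ::
          (Nat.toDigits 10 (List.count "naranja" alerts) ++ ' ' ::
            (Nat.toDigits 10 (List.count "rojo" alerts) ++ ' ' ::
              (Nat.toDigits 10 (List.count "morado" alerts) ++ ' ' ::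
                Nat.toDigits 10 (List.count "marron" alerts))))) := by
  simp [clasify_alarms_alt, COLORS, pvB_count,
    PySem.Str.toList_join, PySem.Chars.join, List.intercalate,
    PySem.Int.toList_toStr, pvToChars_natCast]

-- ===== VERDICT (by name: the statement is the Claim_ definition above) =====
theorem clasify_alarms_spec : Claim_equal_clasify_alarms := by
  intro alerts _
  unfold Spec_clasify_alarms
  rw [← String.toList_inj, pvA_toList, pvB_toList,
    pvStrip_six _ _ _ _ _ _ (pvToDigits_ne_nil _) (pvToDigits_ne_nil _)
      (pvToDigits_not_space _) (pvToDigits_not_space _)]
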